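-- pv_equiv track=rewrite | github.com/Neeraj-Panchal-DEV/Ryunova | web/accounts/views.py | _phone_parts_from_e164
-- ===== SOURCE A (Python) =====
-- def _phone_parts_from_e164(e164: str | None) -> tuple[str, str]:
--     if not e164 or not str(e164).strip():
--         return ("+61", "")
--     s = str(e164).strip()
--     if not s.startswith("+"):
--         return ("+61", s)
--     common = ("+61", "+1", "+44", "+64", "+91", "+86", "+81", "+49", "+33", "+353")
--     for p in sorted(common, key=len, reverse=True):
--         if s.startswith(p):
--             return (p, s[len(p) :])
--     return (s[:3], s[3:])
-- ===== SOURCE B (Python) =====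
-- # Character-at-a-time DFA: transition table keyed by (state, char), accept states
-- # mark a complete country code (the code set is prefix-free, so the unique DFA
-- # accept point equals A's longest-prefix match).
-- _TRANS = {
--     (0, '+'): 1,
--     (1, '1'): 2,                       # +1
--     (1, '6'): 3, (3, '1'): 4, (3, '4'): 5,     # +61 +64
--     (1, '4'): 6, (6, '4'): 7, (6, '9'): 8,     # +44 +49
--     (1, '9'): 9, (9, '1'): 10,                 # +91
--     (1, '8'): 11, (11, '6'): 12, (11, '1'): 13,  # +86 +81
--     (1, '3'): 14, (14, '3'): 15,               # +33
--     (14, '5'): 16, (16, '3'): 17,              # +353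
-- }
-- _ACCEPT = {2, 4, 5, 7, 8, 10, 12, 13, 15, 17}
--
-- def _phone_parts_from_e164(e164):
--     if not e164 or not str(e164).strip():
--         return ("+61", "")
--     s = str(e164).strip()
--     if not s.startswith("+"):
--         return ("+61", s)
--     state, i = 0, 0
--     while i < len(s) and (state, s[i]) in _TRANS:
--         state = _TRANS[(state, s[i])]
--         i += 1
--         if state in _ACCEPT:
--             return (s[:i], s[i:])
--     return (s[:3], s[3:])
-- ===== Notes on version B (the rewrite author's own statement) =====
-- stated objective: alternative
-- what changed: Replaces the per-call sort of the prefix tuple and the 10-element startswith scan with an explicit character-at-a-time DFA: a transition table keyed by (state, char) and a set of accept states; the code set is prefix-free, so the unique DFA accept point equals A's longest-prefix match.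
import Mathlib
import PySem

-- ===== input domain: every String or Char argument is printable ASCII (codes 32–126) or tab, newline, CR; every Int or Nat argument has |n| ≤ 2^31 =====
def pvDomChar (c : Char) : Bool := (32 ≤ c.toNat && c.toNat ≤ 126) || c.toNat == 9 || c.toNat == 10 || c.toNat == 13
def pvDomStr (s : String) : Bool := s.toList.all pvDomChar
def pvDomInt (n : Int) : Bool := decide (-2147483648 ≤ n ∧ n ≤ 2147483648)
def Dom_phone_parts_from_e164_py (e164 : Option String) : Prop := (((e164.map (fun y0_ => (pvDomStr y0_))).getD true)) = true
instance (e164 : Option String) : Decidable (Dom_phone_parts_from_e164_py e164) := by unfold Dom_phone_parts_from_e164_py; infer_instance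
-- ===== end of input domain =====

-- B replaces A's per-call sort and 10-element startswith scan by a character-at-a-time
-- DFA (a transition table keyed by (state, char) plus an accept-state set); the code set
-- is prefix-free, so the DFA accept point equals A's longest-prefix match.

-- ===== PORT A =====
-- the 'for p in sorted(common, key=len, reverse=True): if s.startswith(p): return …' loop
def pvALoop (s : String) : List String → String × String
  | [] => (PySem.Str.slice s none (some 3), PySem.Str.slice s (some 3) none)
  | p :: rest =>
      if PySem.Str.startswith s p then (p, PySem.Str.slice s (some (PySem.Str.len p : Int)) none)
      else pvALoop s rest

def phone_parts_from_e164_py (e164 : Option String) : String × String :=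
  match e164 with
  | none => ("+61", "")
  | some e =>
    if e = "" ∨ PySem.Str.strip e = "" then ("+61", "")
    else
      let s := PySem.Str.strip e
      if ¬ (PySem.Str.startswith s "+" = true) then ("+61", s)
      else
        let common := ["+61", "+1", "+44", "+64", "+91", "+86", "+81", "+49", "+33", "+353"]
        pvALoop s (PySem.List.sorted common (fun p => PySem.Str.len p) true)

-- ===== PORT B =====
-- Source B's module-level transition dict _TRANS and accept set _ACCEPT
def pvTrans : PySem.Dict (Int × Char) Int :=
  PySem.Dict.ofList
    [((0, '+'), 1),
     ((1, '1'), 2),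
     ((1, '6'), 3), ((3, '1'), 4), ((3, '4'), 5),
     ((1, '4'), 6), ((6, '4'), 7), ((6, '9'), 8),
     ((1, '9'), 9), ((9, '1'), 10),
     ((1, '8'), 11), ((11, '6'), 12), ((11, '1'), 13),
     ((1, '3'), 14), ((14, '3'), 15),
     ((14, '5'), 16), ((16, '3'), 17)]

def pvAccept : PySem.Set Int := PySem.Set.ofList [2, 4, 5, 7, 8, 10, 12, 13, 15, 17]

-- the 'while i < len(s) and (state, s[i]) in _TRANS: …' loop; rest = the chars of s from index i on
def pvBWalk (s : String) (state : Int) (i : Int) : List Char → String × String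
  | [] => (PySem.Str.slice s none (some 3), PySem.Str.slice s (some 3) none)
  | c :: rest =>
      match PySem.Dict.get? pvTrans (state, c) with
      | none => (PySem.Str.slice s none (some 3), PySem.Str.slice s (some 3) none)
      | some st =>
          if PySem.Set.contains pvAccept st then
            (PySem.Str.slice s none (some (i + 1)), PySem.Str.slice s (some (i + 1)) none)
          else pvBWalk s st (i + 1) rest

def phone_parts_from_e164_py_alt (e164 : Option String) : String × String :=
  match e164 with
  | none => ("+61", "")
  | some e =>
    if e = "" ∨ PySem.Str.strip e = "" then ("+61", "")
    else
      let s := PySem.Str.strip e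
      if ¬ (PySem.Str.startswith s "+" = true) then ("+61", s)
      else pvBWalk s 0 0 s.toList

-- ===== PRECONDITION & SPEC =====
def Spec_phone_parts_from_e164_py (e164 : Option String) (out : String × String) : Prop := out = phone_parts_from_e164_py_alt e164
instance (e164 : Option String) (out : String × String) : Decidable (Spec_phone_parts_from_e164_py e164 out) := by unfold Spec_phone_parts_from_e164_py; infer_instance

-- ===== CLAIM (what is proved, stated in full; the proofs are below) =====
def Claim_equal_phone_parts_from_e164_py : Prop := ∀ (e164 : Option String), Dom_phone_parts_from_e164_py e164 → Spec_phone_parts_from_e164_py e164 (phone_parts_from_e164_py e164)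

-- ===== LEMMAS AND PROOFS =====

-- pvTrans's association list, named concretely
theorem pvTransMk : pvTrans = PySem.Dict.mk
    [((0, '+'), 1),
     ((1, '1'), 2),
     ((1, '6'), 3), ((3, '1'), 4), ((3, '4'), 5),
     ((1, '4'), 6), ((6, '4'), 7), ((6, '9'), 8),
     ((1, '9'), 9), ((9, '1'), 10),
     ((1, '8'), 11), ((11, '6'), 12), ((11, '1'), 13),
     ((1, '3'), 14), ((14, '3'), 15),
     ((14, '5'), 16), ((16, '3'), 17)] := by decide

-- the DFA's transition function, one characterisation per reachable state
theorem pvBeqPair (a c : Int) (b d : Char) : ((a,b) == (c,d)) = (a == c && b == d) := rfl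

set_option maxHeartbeats 1000000 in
theorem pvGet0 (c : Char) : PySem.Dict.get? pvTrans (0, c) =
    if c = '+' then some 1 else none := by
  by_cases h0 : c = '+'
  · subst h0; decide
  have e0 : ('+' == c) = false := beq_eq_false_iff_ne.mpr (fun h => h0 h.symm)
  simp [pvTransMk, PySem.Dict.get?, List.find?, pvBeqPair, e0, h0]
set_option maxHeartbeats 1000000 in
theorem pvGet1 (c : Char) : PySem.Dict.get? pvTrans (1, c) =
    if c = '1' then some 2 else if c = '6' then some 3 else if c = '4' then some 6 else if c = '9' then some 9 else if c = '8' then some 11 else if c = '3' then some 14 else none := by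
  by_cases h0 : c = '1'
  · subst h0; decide
  by_cases h1 : c = '6'
  · subst h1; decide
  by_cases h2 : c = '4'
  · subst h2; decide
  by_cases h3 : c = '9'
  · subst h3; decide
  by_cases h4 : c = '8'
  · subst h4; decide
  by_cases h5 : c = '3'
  · subst h5; decide
  have e0 : ('1' == c) = false := beq_eq_false_iff_ne.mpr (fun h => h0 h.symm)
  have e1 : ('6' == c) = false := beq_eq_false_iff_ne.mpr (fun h => h1 h.symm)
  have e2 : ('4' == c) = false := beq_eq_false_iff_ne.mpr (fun h => h2 h.symm)
  have e3 : ('9' == c) = false := beq_eq_false_iff_ne.mpr (fun h => h3 h.symm)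
  have e4 : ('8' == c) = false := beq_eq_false_iff_ne.mpr (fun h => h4 h.symm)
  have e5 : ('3' == c) = false := beq_eq_false_iff_ne.mpr (fun h => h5 h.symm)
  simp [pvTransMk, PySem.Dict.get?, List.find?, pvBeqPair, e0, h0, e1, h1, e2, h2, e3, h3, e4, h4, e5, h5]
set_option maxHeartbeats 1000000 in
theorem pvGet3 (c : Char) : PySem.Dict.get? pvTrans (3, c) =
    if c = '1' then some 4 else if c = '4' then some 5 else none := by
  by_cases h0 : c = '1'
  · subst h0; decide
  by_cases h1 : c = '4'
  · subst h1; decide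
  have e0 : ('1' == c) = false := beq_eq_false_iff_ne.mpr (fun h => h0 h.symm)
  have e1 : ('4' == c) = false := beq_eq_false_iff_ne.mpr (fun h => h1 h.symm)
  simp [pvTransMk, PySem.Dict.get?, List.find?, pvBeqPair, e0, h0, e1, h1]
set_option maxHeartbeats 1000000 in
theorem pvGet6 (c : Char) : PySem.Dict.get? pvTrans (6, c) =
    if c = '4' then some 7 else if c = '9' then some 8 else none := by
  by_cases h0 : c = '4'
  · subst h0; decide
  by_cases h1 : c = '9'
  · subst h1; decide
  have e0 : ('4' == c) = false := beq_eq_false_iff_ne.mpr (fun h => h0 h.symm)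
  have e1 : ('9' == c) = false := beq_eq_false_iff_ne.mpr (fun h => h1 h.symm)
  simp [pvTransMk, PySem.Dict.get?, List.find?, pvBeqPair, e0, h0, e1, h1]
set_option maxHeartbeats 1000000 in
theorem pvGet9 (c : Char) : PySem.Dict.get? pvTrans (9, c) =
    if c = '1' then some 10 else none := by
  by_cases h0 : c = '1'
  · subst h0; decide
  have e0 : ('1' == c) = false := beq_eq_false_iff_ne.mpr (fun h => h0 h.symm)
  simp [pvTransMk, PySem.Dict.get?, List.find?, pvBeqPair, e0, h0]
set_option maxHeartbeats 1000000 in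
theorem pvGet11 (c : Char) : PySem.Dict.get? pvTrans (11, c) =
    if c = '6' then some 12 else if c = '1' then some 13 else none := by
  by_cases h0 : c = '6'
  · subst h0; decide
  by_cases h1 : c = '1'
  · subst h1; decide
  have e0 : ('6' == c) = false := beq_eq_false_iff_ne.mpr (fun h => h0 h.symm)
  have e1 : ('1' == c) = false := beq_eq_false_iff_ne.mpr (fun h => h1 h.symm)
  simp [pvTransMk, PySem.Dict.get?, List.find?, pvBeqPair, e0, h0, e1, h1]
set_option maxHeartbeats 1000000 in
theorem pvGet14 (c : Char) : PySem.Dict.get? pvTrans (14, c) =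
    if c = '3' then some 15 else if c = '5' then some 16 else none := by
  by_cases h0 : c = '3'
  · subst h0; decide
  by_cases h1 : c = '5'
  · subst h1; decide
  have e0 : ('3' == c) = false := beq_eq_false_iff_ne.mpr (fun h => h0 h.symm)
  have e1 : ('5' == c) = false := beq_eq_false_iff_ne.mpr (fun h => h1 h.symm)
  simp [pvTransMk, PySem.Dict.get?, List.find?, pvBeqPair, e0, h0, e1, h1]
set_option maxHeartbeats 1000000 in
theorem pvGet16 (c : Char) : PySem.Dict.get? pvTrans (16, c) =
    if c = '3' then some 17 else none := by
  by_cases h0 : c = '3'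
  · subst h0; decide
  have e0 : ('3' == c) = false := beq_eq_false_iff_ne.mpr (fun h => h0 h.symm)
  simp [pvTransMk, PySem.Dict.get?, List.find?, pvBeqPair, e0, h0]

-- sorted(common, key=len, reverse=True) named concretely (stable: ties keep source order)
theorem pvSortedCommon :
    PySem.List.sorted ["+61", "+1", "+44", "+64", "+91", "+86", "+81", "+49", "+33", "+353"]
      (fun p => PySem.Str.len p) true
      = ["+353", "+61", "+44", "+64", "+91", "+86", "+81", "+49", "+33", "+1"] := by decide

-- core: on a stripped string starting with '+', A's prefix scan equals B's DFA walk
set_option maxHeartbeats 1600000 in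
set_option maxRecDepth 8192 in
theorem pvLoop_eq (s : String) (h : PySem.Str.startswith s "+" = true) :
    pvALoop s ["+353", "+61", "+44", "+64", "+91", "+86", "+81", "+49", "+33", "+1"]
      = pvBWalk s 0 0 s.toList := by
  have hpre : ('+' : Char) :: [] <+: s.toList := by
    have := h
    simp only [PySem.Str.startswith_eq] at this
    exact (PySem.Chars.startswith_iff _ _).mp this
  obtain ⟨r, hs⟩ : ∃ r, s.toList = '+' :: r := by
    obtain ⟨t, ht⟩ := hpre
    exact ⟨t, ht.symm⟩
  clear h hpre
  obtain rfl : String.ofList ('+' :: r) = s := by rw [← hs, String.ofList_toList]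
  clear hs
  match r with
  | [] =>
    simp [pvALoop, pvBWalk, pvGet0, pvGet1, pvGet3, pvGet6, pvGet9, pvGet11, pvGet14, pvGet16,
      pvAccept, PySem.Set.contains, ← String.toList_inj, PySem.Str.startswith,
      PySem.Chars.startswith, PySem.Str.toList_slice, PySem.List.slice_to, PySem.List.slice_from]
  | [a] =>
    simp [pvALoop, pvBWalk, pvGet0, pvGet1, pvGet3, pvGet6, pvGet9, pvGet11, pvGet14, pvGet16,
      pvAccept, PySem.Set.contains, ← String.toList_inj, PySem.Str.startswith,
      PySem.Chars.startswith, PySem.Str.toList_slice, PySem.List.slice_to, PySem.List.slice_from]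
    split_ifs <;>
      (try simp_all [← String.toList_inj, eq_comm, PySem.List.slice_from, PySem.List.slice_to,
        pvBWalk, pvGet0, pvGet1, pvGet3, pvGet6, pvGet9, pvGet11, pvGet14, pvGet16,
        pvAccept, PySem.Set.contains])
  | [a, b] =>
    simp [pvALoop, pvBWalk, pvGet0, pvGet1, pvGet3, pvGet6, pvGet9, pvGet11, pvGet14, pvGet16,
      pvAccept, PySem.Set.contains, ← String.toList_inj, PySem.Str.startswith,
      PySem.Chars.startswith, PySem.Str.toList_slice, PySem.List.slice_to, PySem.List.slice_from]
    split_ifs <;>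
      (try simp_all [← String.toList_inj, eq_comm, PySem.List.slice_from, PySem.List.slice_to,
        pvBWalk, pvGet0, pvGet1, pvGet3, pvGet6, pvGet9, pvGet11, pvGet14, pvGet16,
        pvAccept, PySem.Set.contains]) <;>
      (first | decide | (split <;> rfl))
  | a :: b :: c :: r' =>
    by_cases ha : a = '3'
    · subst ha
      by_cases hb5 : b = '5' <;> by_cases hb3 : b = '3' <;> by_cases hc3 : c = '3' <;>
        (try simp_all [pvALoop, pvBWalk, pvGet0, pvGet1, pvGet3, pvGet6, pvGet9, pvGet11, pvGet14,
          pvGet16, pvAccept, PySem.Set.contains, ← String.toList_inj, PySem.Str.startswith,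
          PySem.Chars.startswith, PySem.Str.toList_slice, PySem.List.slice_to,
          PySem.List.slice_from]) <;>
        simp_all [eq_comm]
    · simp [pvALoop, pvBWalk, pvGet0, pvGet1, pvGet3, pvGet6, pvGet9, pvGet11, pvGet14, pvGet16,
        pvAccept, PySem.Set.contains, ← String.toList_inj, PySem.Str.startswith,
        PySem.Chars.startswith, PySem.Str.toList_slice, PySem.List.slice_to,
        PySem.List.slice_from, ha]
      split_ifs <;>
        (try simp_all [← String.toList_inj, eq_comm, PySem.List.slice_from, PySem.List.slice_to,
          pvBWalk, pvGet0, pvGet1, pvGet3, pvGet6, pvGet9, pvGet11, pvGet14, pvGet16,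
          pvAccept, PySem.Set.contains])

-- ===== VERDICT (by name: the statement is the Claim_ definition above) =====
theorem phone_parts_from_e164_py_spec : Claim_equal_phone_parts_from_e164_py := by
  intro e164 _
  unfold Spec_phone_parts_from_e164_py phone_parts_from_e164_py phone_parts_from_e164_py_alt
  cases e164 with
  | none => rfl
  | some e =>
    by_cases hg : e = "" ∨ PySem.Str.strip e = ""
    · simp [hg]
    · simp only [hg, if_false]
      by_cases hp : PySem.Str.startswith (PySem.Str.strip e) "+" = true
      · simp only [hp, not_true, if_false]
        rw [pvSortedCommon]
        exact (pvLoop_eq _ hp).symm ▸ rfl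
      · have hp' : PySem.Chars.startswith (PySem.Chars.strip e.toList) ['+'] = false := by
          simpa [PySem.Str.toList_strip] using hp
        simp [hp']
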